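-- pv_equiv track=rewrite | github.com/Robgea/2021-Advent-of-Code | Day One/second.py | enumerator
-- ===== SOURCE A (Python) =====
-- def enumerator(input_list):
--
-- 	count_num = 0
-- 	sum_total = 0
-- 	sum_list = []
--
-- 	for num in input_list:
-- 		sum_total += num
-- 		count_num += 1
--
-- 		if count_num == 3:
-- 			sum_list.append(sum_total)
-- 			sum_total = 0
-- 			count_num = 0
--
-- 	enum_list = enumerate(sum_list)
-- 	enum_dict = dict((i,v) for i,v in enum_list)
--
-- 	return enum_dict
-- ===== SOURCE B (Python) =====
-- def enumerator(input_list):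
--     sums = [sum(g) for g in zip(*[iter(input_list)] * 3)]
--     return dict(enumerate(sums))
-- ===== Notes on version B (the rewrite author's own statement) =====
-- stated objective: idiomatic
-- what changed: Replaces the manual running sum/counter loop with grouping the list into complete triples via zip(*[iter(l)]*3), mapping sum over the groups, and building the result with dict(enumerate(...)).
import Mathlib
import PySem

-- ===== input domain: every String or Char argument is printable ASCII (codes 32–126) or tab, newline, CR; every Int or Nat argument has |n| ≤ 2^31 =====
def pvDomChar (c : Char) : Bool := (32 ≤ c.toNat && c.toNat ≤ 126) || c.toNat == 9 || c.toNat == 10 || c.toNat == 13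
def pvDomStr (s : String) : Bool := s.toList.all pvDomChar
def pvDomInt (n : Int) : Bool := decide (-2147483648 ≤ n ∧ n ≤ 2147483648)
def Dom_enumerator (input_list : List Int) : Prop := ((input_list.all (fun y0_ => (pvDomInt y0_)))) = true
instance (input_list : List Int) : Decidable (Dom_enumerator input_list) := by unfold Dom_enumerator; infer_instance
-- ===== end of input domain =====

-- B replaces A's running sum/counter loop by grouping the list into complete triples, summing each, and enumerating the sums (idiomatic decomposition; same cost).


-- ===== PORT A =====
def enumerator (input_list : List Int) : List (Int × Int) :=
  let st := input_list.foldl (fun (st : Int × Int × List Int) num =>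
    let sum_total := st.2.1 + num
    let count_num := st.1 + 1
    if count_num == 3 then (0, 0, st.2.2 ++ [sum_total])
    else (count_num, sum_total, st.2.2)) (0, 0, [])
  let sum_list := st.2.2
  let enum_list := PySem.List.enumerate sum_list 0
  -- dict((i,v) for i,v in enum_list): build the dict by inserting each pair, return it as an assoc list
  (enum_list.foldl (fun d (p : Int × Int) => d.insert p.1 p.2) PySem.Dict.empty).items

-- ===== PORT B =====
-- zip(*[iter(input_list)]*3): consecutive complete triples (trailing <3 leftovers dropped)
def sums3 : List Int → List Int
  | a :: b :: c :: rest => (a + b + c) :: sums3 rest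
  | _ => []

def enumerator_alt (input_list : List Int) : List (Int × Int) :=
  PySem.List.enumerate (sums3 input_list) 0

-- ===== PRECONDITION & SPEC =====
def Spec_enumerator (input_list : List Int) (out : List (Int × Int)) : Prop := out = enumerator_alt input_list
instance (input_list : List Int) (out : List (Int × Int)) : Decidable (Spec_enumerator input_list out) := by unfold Spec_enumerator; infer_instance

-- ===== CLAIM (what is proved, stated in full; the proofs are below) =====
def Claim_equal_enumerator : Prop := ∀ (input_list : List Int), Dom_enumerator input_list → Spec_enumerator input_list (enumerator input_list)

-- ===== LEMMAS AND PROOFS =====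

theorem foldA (l : List Int) (acc : List Int) :
    (l.foldl (fun (st : Int × Int × List Int) num =>
      let sum_total := st.2.1 + num
      let count_num := st.1 + 1
      if count_num == 3 then (0, 0, st.2.2 ++ [sum_total])
      else (count_num, sum_total, st.2.2)) (0, 0, acc)).2.2 = acc ++ sums3 l := by
  induction l using sums3.induct generalizing acc with
  | case1 a b c rest ih =>
      simp only [sums3]
      simp at ih ⊢
      simp [ih]
  | case2 l h =>
      match l, h with
      | [], _ => simp [sums3]
      | [a], _ => simp [List.foldl, sums3]
      | [a, b], _ => simp [List.foldl, sums3]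
      | a :: b :: c :: rest, h => exact absurd rfl (h a b c rest)

theorem dict_of_enumerate (xs : List Int) :
    ((PySem.List.enumerate xs 0).foldl (fun d (p : Int × Int) => d.insert p.1 p.2)
      PySem.Dict.empty).items = PySem.List.enumerate xs 0 := by
  have hfresh : ∀ p ∈ PySem.List.enumerate xs 0,
      (PySem.Dict.empty : PySem.Dict Int Int).contains p.1 = false := by
    intro p _; simp [PySem.Dict.contains_empty]
  have hnd : ((PySem.List.enumerate xs 0).map Prod.fst).Nodup := by
    have := PySem.List.pairwise_lt_enumerate xs (0 : Int)
    rw [List.nodup_iff_pairwise_ne, List.pairwise_map]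
    exact this.imp (fun hlt => ne_of_lt hlt)
  have := PySem.Dict.items_foldl_insert_fresh (l := PySem.List.enumerate xs 0)
    (k := Prod.fst) (v := Prod.snd) (d := PySem.Dict.empty) hfresh hnd
  simpa using this

-- ===== VERDICT (by name: the statement is the Claim_ definition above) =====
theorem enumerator_spec : Claim_equal_enumerator := by
  intro input_list _
  show _ = _
  simp only [enumerator, enumerator_alt]
  rw [foldA input_list []]
  simpa using dict_of_enumerate (sums3 input_list)
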